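-- pv_equiv track=rewrite | github.com/LenzGit/OpenAniMusic | gui/detect_and_copy_staff_lines.py | group_staff_lines
-- ===== SOURCE A (Python) =====
-- def group_staff_lines(horizontal_groups, vertical_groups, intersections):
--     """
--     Groups horizontal and vertical groups into staves based on intersections.
--
--     Parameter:
--     - horizontal_groups: List of horizontal groups
--     - vertical_groups: List of vertical groups
--     - intersections: List of tuples (horizontal_group_index, vertical_group_index)
--
--     Return:
--     - List of note rows, each note row is a tuple (horizontal_group, [left_vertical_groups], [right_vertical_groups])
--     """
--     staff_lines = []
--     h_to_v = {}
--     for (h_idx, v_idx) in intersections: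
--         if h_idx not in h_to_v:
--             h_to_v[h_idx] = set()
--         h_to_v[h_idx].add(v_idx)
--
--     for h_idx, h_group in enumerate(horizontal_groups):
--         if h_idx in h_to_v:
--             v_indices = list(h_to_v[h_idx])
--             left_v = min(v_indices)
--             right_v = max(v_indices)
--             staff_lines.append((h_group, [left_v], [right_v]))
--         else:
--             staff_lines.append((h_group, [], []))
--     return staff_lines
-- ===== SOURCE B (Python) =====
-- def group_staff_lines(horizontal_groups, vertical_groups, intersections):
--     staff_lines = []
--     for h_idx, h_group in enumerate(horizontal_groups):
--         v = [vi for (hi, vi) in intersections if hi == h_idx]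
--         if v:
--             staff_lines.append((h_group, [min(v)], [max(v)]))
--         else:
--             staff_lines.append((h_group, [], []))
--     return staff_lines
-- ===== Notes on version B (the rewrite author's own statement) =====
-- stated objective: simpler
-- what changed: Removed the prebuilt h_to_v dict-of-sets index entirely: B scans the intersections list directly per horizontal group and takes min/max of the matching vertical indices in place.
import Mathlib
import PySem

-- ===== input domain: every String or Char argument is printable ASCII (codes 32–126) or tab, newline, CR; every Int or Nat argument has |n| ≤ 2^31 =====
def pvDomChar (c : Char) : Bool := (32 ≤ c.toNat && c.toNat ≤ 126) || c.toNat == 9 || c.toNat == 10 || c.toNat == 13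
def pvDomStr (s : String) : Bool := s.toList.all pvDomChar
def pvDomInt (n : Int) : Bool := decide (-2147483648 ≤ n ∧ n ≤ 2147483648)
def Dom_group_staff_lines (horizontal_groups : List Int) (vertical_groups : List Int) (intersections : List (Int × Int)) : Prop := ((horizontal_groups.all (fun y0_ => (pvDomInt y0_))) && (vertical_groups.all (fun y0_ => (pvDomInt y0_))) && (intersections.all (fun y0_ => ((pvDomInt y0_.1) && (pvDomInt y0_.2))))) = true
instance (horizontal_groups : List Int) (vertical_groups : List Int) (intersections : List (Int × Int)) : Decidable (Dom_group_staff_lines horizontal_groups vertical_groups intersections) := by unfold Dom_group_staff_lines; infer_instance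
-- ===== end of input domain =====

-- B drops A's prebuilt h_to_v dict-of-sets index and instead scans the intersections
-- list directly for each horizontal group, taking min/max in place (objective: simpler).

-- ===== PORT A =====
def group_staff_lines (horizontal_groups : List Int) (vertical_groups : List Int) (intersections : List (Int × Int)) : List (Int × List Int × List Int) :=
  -- h_to_v = {}; for (h_idx, v_idx) in intersections: setdefault-style insert then add
  let h_to_v : PySem.Dict Int (PySem.Set Int) :=
    intersections.foldl (fun d p =>
      let d := if d.contains p.1 then d else d.insert p.1 PySem.Set.empty
      d.modify p.1 PySem.Set.empty (fun s => PySem.Set.add s p.2)) PySem.Dict.empty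
  -- for h_idx, h_group in enumerate(horizontal_groups): append …
  (PySem.List.enumerate horizontal_groups).foldl (fun acc q =>
    if h_to_v.contains q.1 then
      let v := h_to_v.getD q.1 PySem.Set.empty
      -- min(v)/max(v); the set is nonempty whenever the key is present, so the
      -- `none` branch (where Python would raise ValueError) is unreachable
      match PySem.List.min? v (fun x => x), PySem.List.max? v (fun x => x) with
      | some l, some r => acc ++ [(q.2, [l], [r])]
      | _, _ => acc ++ [(q.2, [], [])]
    else acc ++ [(q.2, [], [])]) []

-- ===== PORT B =====
def group_staff_lines_alt (horizontal_groups : List Int) (vertical_groups : List Int) (intersections : List (Int × Int)) : List (Int × List Int × List Int) :=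
  (PySem.List.enumerate horizontal_groups).map (fun q =>
    -- v = [vi for (hi, vi) in intersections if hi == h_idx]
    match (intersections.filter (fun p => p.1 == q.1)).map (fun p => p.2) with
    | [] => (q.2, ([] : List Int), ([] : List Int))
    | x :: t => (q.2, [t.foldl min x], [t.foldl max x]))  -- min(v), max(v)

-- ===== PRECONDITION & SPEC =====
def Spec_group_staff_lines (horizontal_groups : List Int) (vertical_groups : List Int) (intersections : List (Int × Int)) (out : List (Int × List Int × List Int)) : Prop := out = group_staff_lines_alt horizontal_groups vertical_groups intersections
instance (horizontal_groups : List Int) (vertical_groups : List Int) (intersections : List (Int × Int)) (out : List (Int × List Int × List Int)) : Decidable (Spec_group_staff_lines horizontal_groups vertical_groups intersections out) := by unfold Spec_group_staff_lines; infer_instance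

-- ===== CLAIM (what is proved, stated in full; the proofs are below) =====
def Claim_equal_group_staff_lines : Prop := ∀ (horizontal_groups : List Int) (vertical_groups : List Int) (intersections : List (Int × Int)), Dom_group_staff_lines horizontal_groups vertical_groups intersections → Spec_group_staff_lines horizontal_groups vertical_groups intersections (group_staff_lines horizontal_groups vertical_groups intersections)

-- ===== LEMMAS AND PROOFS =====

-- the value stored by A's grouping loop at key k is set(values of the pairs whose first component is k)
theorem pv_getD_fold (intersections : List (Int × Int)) (d : PySem.Dict Int (PySem.Set Int)) (k : Int) :
    (intersections.foldl (fun d p =>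
      let d := if d.contains p.1 then d else d.insert p.1 PySem.Set.empty
      d.modify p.1 PySem.Set.empty (fun s => PySem.Set.add s p.2)) d).getD k PySem.Set.empty
    = ((intersections.filter (fun p => p.1 == k)).map (fun p => p.2)).foldl PySem.Set.add (d.getD k PySem.Set.empty) := by
  induction intersections generalizing d with
  | nil => rfl
  | cons p rest ih =>
    simp only [List.foldl_cons, List.filter_cons]
    by_cases hk : p.1 = k
    · subst hk
      simp only [BEq.rfl, if_true, List.map_cons, List.foldl_cons, ih]
      congr 1
      by_cases hc : d.contains p.1
      · rw [if_pos hc, PySem.Dict.getD_modify_self]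
      · rw [if_neg hc, PySem.Dict.getD_modify_self, PySem.Dict.getD_insert_self,
            PySem.Dict.getD_of_not_contains d _ (by simpa using hc)]
    · have hbe : (p.1 == k) = false := by simpa using hk
      simp only [hbe, Bool.false_eq_true, if_false, ih]
      congr 1
      by_cases hc : d.contains p.1
      · rw [if_pos hc, PySem.Dict.getD_modify_of_ne d _ _ (Ne.symm hk)]
      · rw [if_neg hc, PySem.Dict.getD_modify_of_ne _ _ _ (Ne.symm hk),
            PySem.Dict.getD_insert, if_neg (Ne.symm hk)]

-- the keys present after A's grouping loop are exactly the first components seen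
theorem pv_contains_fold (intersections : List (Int × Int)) (d : PySem.Dict Int (PySem.Set Int)) (k : Int) :
    (intersections.foldl (fun d p =>
      let d := if d.contains p.1 then d else d.insert p.1 PySem.Set.empty
      d.modify p.1 PySem.Set.empty (fun s => PySem.Set.add s p.2)) d).contains k
    = (d.contains k || intersections.any (fun p => p.1 == k)) := by
  induction intersections generalizing d with
  | nil => simp
  | cons p rest ih =>
    simp only [List.foldl_cons, List.any_cons, ih]
    by_cases hk : k = p.1
    · subst hk
      by_cases hc : d.contains p.1 <;>
        simp [hc, PySem.Dict.contains_modify]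
    · have h1 : (k == p.1) = false := by simpa using hk
      have h2 : (p.1 == k) = false := by simpa using (Ne.symm hk)
      by_cases hc : d.contains p.1 <;>
        simp [hc, PySem.Dict.contains_modify, PySem.Dict.contains_insert, h1, h2]

-- min/max over set(vs) agree with min/max over vs
theorem pv_min?_ofList (vs : List Int) :
    PySem.List.min? (PySem.Set.ofList vs) (fun x => x) = PySem.List.min? vs (fun x => x) := by
  cases hv : vs with
  | nil => rfl
  | cons x t =>
    have hne : PySem.Set.ofList (x :: t) ≠ [] := by
      intro h
      have hx : x ∈ PySem.Set.ofList (x :: t) := (PySem.Set.mem_ofList _ _).2 (by simp)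
      simp [h] at hx
    have hm' : PySem.List.min? (PySem.Set.ofList (x :: t)) (fun y : Int => y) ≠ none :=
      fun h => hne ((PySem.List.min?_eq_none_iff _ _).1 h)
    have hn' : PySem.List.min? (x :: t) (fun y : Int => y) ≠ none :=
      fun h => (by simp : x :: t ≠ []) ((PySem.List.min?_eq_none_iff _ _).1 h)
    obtain ⟨m, hm⟩ := Option.ne_none_iff_exists'.1 hm'
    obtain ⟨n, hn⟩ := Option.ne_none_iff_exists'.1 hn'
    rw [hm, hn]
    have hmmem : m ∈ x :: t := (PySem.Set.mem_ofList _ _).1 (PySem.List.min?_mem hm)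
    have hnmem : n ∈ PySem.Set.ofList (x :: t) := (PySem.Set.mem_ofList _ _).2 (PySem.List.min?_mem hn)
    have h1 : n ≤ m := PySem.List.min?_isMin hn m hmmem
    have h2 : m ≤ n := PySem.List.min?_isMin hm n hnmem
    exact congrArg some (le_antisymm h2 h1)

theorem pv_max?_ofList (vs : List Int) :
    PySem.List.max? (PySem.Set.ofList vs) (fun x => x) = PySem.List.max? vs (fun x => x) := by
  cases hv : vs with
  | nil => rfl
  | cons x t =>
    have hne : PySem.Set.ofList (x :: t) ≠ [] := by
      intro h
      have hx : x ∈ PySem.Set.ofList (x :: t) := (PySem.Set.mem_ofList _ _).2 (by simp)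
      simp [h] at hx
    have hm' : PySem.List.max? (PySem.Set.ofList (x :: t)) (fun y : Int => y) ≠ none :=
      fun h => hne ((PySem.List.max?_eq_none_iff _ _).1 h)
    have hn' : PySem.List.max? (x :: t) (fun y : Int => y) ≠ none :=
      fun h => (by simp : x :: t ≠ []) ((PySem.List.max?_eq_none_iff _ _).1 h)
    obtain ⟨m, hm⟩ := Option.ne_none_iff_exists'.1 hm'
    obtain ⟨n, hn⟩ := Option.ne_none_iff_exists'.1 hn'
    rw [hm, hn]
    have hmmem : m ∈ x :: t := (PySem.Set.mem_ofList _ _).1 (PySem.List.max?_mem hm)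
    have hnmem : n ∈ PySem.Set.ofList (x :: t) := (PySem.Set.mem_ofList _ _).2 (PySem.List.max?_mem hn)
    have h1 : m ≤ n := PySem.List.max?_isMax hn m hmmem
    have h2 : n ≤ m := PySem.List.max?_isMax hm n hnmem
    exact congrArg some (le_antisymm h1 h2)

-- A's append loop over enumerate, as a map (the per-row value depends only on the row)
theorem pv_foldA (d : PySem.Dict Int (PySem.Set Int)) (l : List (Int × Int)) (acc : List (Int × List Int × List Int)) :
    l.foldl (fun acc q =>
      if d.contains q.1 then
        let v := d.getD q.1 PySem.Set.empty
        match PySem.List.min? v (fun x => x), PySem.List.max? v (fun x => x) with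
        | some lft, some rgt => acc ++ [(q.2, [lft], [rgt])]
        | _, _ => acc ++ [(q.2, [], [])]
      else acc ++ [(q.2, [], [])]) acc
    = acc ++ l.map (fun q =>
      if d.contains q.1 then
        let v := d.getD q.1 PySem.Set.empty
        match PySem.List.min? v (fun x => x), PySem.List.max? v (fun x => x) with
        | some lft, some rgt => (q.2, [lft], [rgt])
        | _, _ => (q.2, [], [])
      else (q.2, [], [])) := by
  induction l generalizing acc with
  | nil => simp
  | cons q rest ih =>
    simp only [List.foldl_cons, List.map_cons, ih]
    have hstep : (if d.contains q.1 then
        let v := d.getD q.1 PySem.Set.empty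
        match PySem.List.min? v (fun x => x), PySem.List.max? v (fun x => x) with
        | some lft, some rgt => acc ++ [(q.2, [lft], [rgt])]
        | _, _ => acc ++ [(q.2, [], [])]
      else acc ++ [(q.2, [], [])])
      = acc ++ [(if d.contains q.1 then
        let v := d.getD q.1 PySem.Set.empty
        match PySem.List.min? v (fun x => x), PySem.List.max? v (fun x => x) with
        | some lft, some rgt => (q.2, [lft], [rgt])
        | _, _ => (q.2, [], [])
      else (q.2, [], []))] := by
      by_cases hc : d.contains q.1
      · simp only [hc, if_true]
        cases PySem.List.min? (d.getD q.1 PySem.Set.empty) (fun x => x) <;>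
          cases PySem.List.max? (d.getD q.1 PySem.Set.empty) (fun x => x) <;> rfl
      · simp [hc]
    rw [hstep, List.append_assoc, List.singleton_append]

-- ===== VERDICT (by name: the statement is the Claim_ definition above) =====
theorem group_staff_lines_spec : Claim_equal_group_staff_lines := by
  intro hg vg inter _
  unfold Spec_group_staff_lines group_staff_lines group_staff_lines_alt
  rw [pv_foldA, List.nil_append]
  apply List.map_congr_left
  intro q _
  have hcont := pv_contains_fold inter PySem.Dict.empty q.1
  have hgetD := pv_getD_fold inter PySem.Dict.empty q.1
  rw [PySem.Dict.contains_empty, Bool.false_or] at hcont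
  rw [PySem.Dict.getD_empty] at hgetD
  have hof : ∀ vs : List Int, List.foldl PySem.Set.add (PySem.Set.empty : PySem.Set Int) vs = PySem.Set.ofList vs :=
    fun vs => rfl
  cases hv : (inter.filter (fun p => p.1 == q.1)).map (fun p => p.2) with
  | nil =>
    have hany : inter.any (fun p => p.1 == q.1) = false := by
      rw [List.any_eq_false]
      intro p hp
      by_contra h
      have hmem : p.2 ∈ (inter.filter (fun p => p.1 == q.1)).map (fun p => p.2) :=
        List.mem_map.2 ⟨p, List.mem_filter.2 ⟨hp, by simpa using h⟩, rfl⟩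
      rw [hv] at hmem; simp at hmem
    rw [hcont, hany]
    rfl
  | cons x t =>
    have hany : inter.any (fun p => p.1 == q.1) = true := by
      rw [List.any_eq_true]
      have hmem : x ∈ (inter.filter (fun p => p.1 == q.1)).map (fun p => p.2) := by rw [hv]; simp
      obtain ⟨p, hp, hx⟩ := List.mem_map.1 hmem
      exact ⟨p, (List.mem_filter.1 hp).1, (List.mem_filter.1 hp).2⟩
    rw [hcont, hany, if_pos rfl]
    rw [hgetD, hof]
    dsimp only
    rw [pv_min?_ofList, pv_max?_ofList, hv,
        PySem.List.min?_id_cons, PySem.List.max?_id_cons]
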